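-- pv_equiv track=rewrite | github.com/intelematics/bricklayer | bricklayer/catalog/crawler.py | _filter_tables_by_prefixes
-- ===== SOURCE A (Python) =====
-- import typing
--
-- def _filter_tables_by_prefixes(
--
--     table_names: typing.Iterable[str],
--     prefixes: typing.Iterable[str]
-- ) -> typing.Iterable[str]:
--     return [
--         table_name
--         for prefix in prefixes
--         for table_name in table_names
--         if table_name.startswith(prefix)
--     ]
-- ===== SOURCE B (Python) =====
-- def _filter_tables_by_prefixes(table_names, prefixes):
--     # One pass over table_names: each name is appended to the bucket of every
--     # prefix it matches; buckets, kept in prefix order, are then flattened.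
--     buckets = [(prefix, []) for prefix in prefixes]
--     for name in table_names:
--         for prefix, bucket in buckets:
--             if name.startswith(prefix):
--                 bucket.append(name)
--     out = []
--     for _, bucket in buckets:
--         out.extend(bucket)
--     return out
-- ===== Notes on version B (the rewrite author's own statement) =====
-- stated objective: alternative
-- what changed: A is a prefix-major nested comprehension re-scanning table_names once per prefix; B makes a single table-major pass that distributes each name into per-prefix buckets and flattens the buckets at the end.
import Mathlib
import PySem

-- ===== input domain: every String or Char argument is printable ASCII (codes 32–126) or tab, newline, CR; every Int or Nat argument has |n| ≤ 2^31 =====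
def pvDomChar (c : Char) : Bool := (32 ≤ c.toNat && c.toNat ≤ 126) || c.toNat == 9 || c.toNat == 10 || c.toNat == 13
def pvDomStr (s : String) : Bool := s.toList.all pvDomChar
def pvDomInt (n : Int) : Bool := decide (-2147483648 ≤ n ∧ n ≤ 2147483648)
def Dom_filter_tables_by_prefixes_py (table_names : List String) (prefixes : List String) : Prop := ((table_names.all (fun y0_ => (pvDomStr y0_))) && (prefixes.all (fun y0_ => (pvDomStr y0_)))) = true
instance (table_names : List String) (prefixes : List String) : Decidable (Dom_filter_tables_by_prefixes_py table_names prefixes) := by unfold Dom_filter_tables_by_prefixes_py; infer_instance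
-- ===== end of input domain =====

-- B makes one table-major pass distributing each name into per-prefix buckets, then flattens; A re-scans table_names per prefix (alternative decomposition, same cost).

-- ===== PORT A =====
-- the nested comprehension: outer loop over prefixes, inner loop over table_names, appending matches
def filter_tables_by_prefixes_py (table_names : List String) (prefixes : List String) : List String :=
  prefixes.foldl
    (fun acc pfx =>
      table_names.foldl
        (fun acc2 table_name =>
          if PySem.Str.startswith table_name pfx then acc2 ++ [table_name] else acc2)
        acc)
    []

-- ===== PORT B =====
-- one step of B's inner loop: append name to every bucket whose prefix matches
def pvBucketStep (buckets : List (String × List String)) (name : String) : List (String × List String) :=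
  buckets.map (fun pb => if PySem.Str.startswith name pb.1 then (pb.1, pb.2 ++ [name]) else pb)

def filter_tables_by_prefixes_py_alt (table_names : List String) (prefixes : List String) : List String :=
  let buckets := prefixes.map (fun pfx => (pfx, ([] : List String)))
  let buckets := table_names.foldl pvBucketStep buckets
  buckets.foldl (fun out pb => out ++ pb.2) []

-- ===== PRECONDITION & SPEC =====
def Spec_filter_tables_by_prefixes_py (table_names : List String) (prefixes : List String) (out : List String) : Prop := out = filter_tables_by_prefixes_py_alt table_names prefixes
instance (table_names : List String) (prefixes : List String) (out : List String) : Decidable (Spec_filter_tables_by_prefixes_py table_names prefixes out) := by unfold Spec_filter_tables_by_prefixes_py; infer_instance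

-- ===== CLAIM (what is proved, stated in full; the proofs are below) =====
def Claim_equal_filter_tables_by_prefixes_py : Prop := ∀ (table_names : List String) (prefixes : List String), Dom_filter_tables_by_prefixes_py table_names prefixes → Spec_filter_tables_by_prefixes_py table_names prefixes (filter_tables_by_prefixes_py table_names prefixes)

-- ===== LEMMAS AND PROOFS =====

-- bucket invariant: after folding over ts, each bucket holds its prior contents
-- followed by the names of ts matching its prefix
theorem pvBucketStep_fold (ts : List String) (bs : List (String × List String)) :
    ts.foldl pvBucketStep bs
      = bs.map (fun pb => (pb.1, pb.2 ++ ts.filter (fun t => PySem.Str.startswith t pb.1))) := by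
  induction ts generalizing bs with
  | nil => simp
  | cons t ts ih =>
    simp only [List.foldl_cons, ih, pvBucketStep, List.map_map]
    apply List.map_congr_left
    intro pb _
    by_cases h : PySem.Chars.startswith t.toList pb.1.toList = true <;>
      simp [h, List.append_assoc, PySem.Str.startswith]

-- A equals the flatMap of per-prefix filters
theorem portA_eq (table_names : List String) (prefixes : List String) :
    filter_tables_by_prefixes_py table_names prefixes
      = prefixes.flatMap (fun p => table_names.filter (fun t => PySem.Str.startswith t p)) := by
  unfold filter_tables_by_prefixes_py
  have hf : (fun (acc : List String) (pfx : String) =>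
        table_names.foldl
          (fun acc2 table_name =>
            if PySem.Str.startswith table_name pfx then acc2 ++ [table_name] else acc2)
          acc)
      = (fun acc pfx => acc ++ table_names.filter (fun t => PySem.Str.startswith t pfx)) := by
    funext acc pfx
    exact PySem.List.foldl_append_if_eq_filter _ _ _
  rw [hf, PySem.List.foldl_append_eq_flatMap]
  simp

-- B equals the same flatMap
theorem portB_eq (table_names : List String) (prefixes : List String) :
    filter_tables_by_prefixes_py_alt table_names prefixes
      = prefixes.flatMap (fun p => table_names.filter (fun t => PySem.Str.startswith t p)) := by
  unfold filter_tables_by_prefixes_py_alt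
  simp only [pvBucketStep_fold, List.map_map, PySem.List.foldl_append_eq_flatMap]
  simp [List.flatMap_def, List.map_map, Function.comp_def]

-- ===== VERDICT (by name: the statement is the Claim_ definition above) =====
theorem filter_tables_by_prefixes_py_spec : Claim_equal_filter_tables_by_prefixes_py := by
  intro table_names prefixes _
  unfold Spec_filter_tables_by_prefixes_py
  rw [portA_eq, portB_eq]
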